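-- pv_equiv track=rewrite | github.com/mratet/advent-of-code_python | solutions/2023/day_22/clean_solution.py | get_is_supported_by_dict
-- ===== SOURCE A (Python) =====
-- def get_is_supported_by_dict(bricks):
--     bricks = sorted(bricks, key=lambda brick: brick[0][2])
--     len_basis = 10
--     basis = {(x, y): (0, -1) for x in range(len_basis) for y in range(len_basis)}
--
--     is_supported_by = [[] for _ in range(len(bricks))]
--
--     for i, [(x_s, y_s, z_s), (x_e, y_e, z_e)] in enumerate(bricks):
--         if x_s != x_e:
--             z_max = max([basis[(x, y_e)][0] for x in range(x_s, x_e + 1)])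
--             for x in range(x_s, x_e + 1):
--                 curr_z, base_id = basis[(x, y_e)]
--                 if curr_z == z_max and base_id not in is_supported_by[i]:
--                     is_supported_by[i].append(base_id)
--                 basis[(x, y_e)] = (z_max + 1, i)
--         elif y_s != y_e:
--             z_max = max([basis[(x_e, y)][0] for y in range(y_s, y_e + 1)])
--             for y in range(y_s, y_e + 1):
--                 curr_z, base_id = basis[(x_e, y)]
--                 if curr_z == z_max and base_id not in is_supported_by[i]:
--                     is_supported_by[i].append(base_id)
--                 basis[(x_e, y)] = (z_max + 1, i)
--         else:  # z_s != z_e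
--             is_supported_by[i].append(basis[(x_e, y_e)][1])
--             curr_z, _ = basis[(x_s, y_s)]
--             basis[(x_s, y_s)] = (curr_z + z_e - z_s + 1, i)
--
--     return is_supported_by
-- ===== SOURCE B (Python) =====
-- def get_is_supported_by_dict(bricks):
--     order = sorted(bricks, key=lambda brick: brick[0][2])
--     settled = []   # per settled brick: (footprint cell list, resting top z)
--     result = []
--     for (x_s, y_s, z_s), (x_e, y_e, z_e) in order:
--         if x_s != x_e:
--             cells, height = [(x, y_e) for x in range(x_s, x_e + 1)], 1
--         elif y_s != y_e:
--             cells, height = [(x_e, y) for y in range(y_s, y_e + 1)], 1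
--         else:
--             cells, height = [(x_s, y_s)], z_e - z_s + 1
--         columns = []
--         for c in cells:
--             top, owner = 0, -1
--             for j, (fp, t) in enumerate(settled):
--                 if c in fp:
--                     top, owner = t, j
--             columns.append((top, owner))
--         z_max = max(top for top, _ in columns)
--         supporters = []
--         for top, owner in columns:
--             if top == z_max and owner not in supporters:
--                 supporters.append(owner)
--         result.append(supporters)
--         settled.append((cells, z_max + height))
--     return result
-- ===== Notes on version B (the rewrite author's own statement) =====
-- stated objective: alternative
-- what changed: B discards A's mutable 10x10 heightmap dict entirely: each brick's resting height and supporters are found by scanning the list of already-settled bricks' footprints (last settled brick covering each column cell wins), so the state is a grow-only list of (footprint, top) records instead of a per-cell grid.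
import Mathlib
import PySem

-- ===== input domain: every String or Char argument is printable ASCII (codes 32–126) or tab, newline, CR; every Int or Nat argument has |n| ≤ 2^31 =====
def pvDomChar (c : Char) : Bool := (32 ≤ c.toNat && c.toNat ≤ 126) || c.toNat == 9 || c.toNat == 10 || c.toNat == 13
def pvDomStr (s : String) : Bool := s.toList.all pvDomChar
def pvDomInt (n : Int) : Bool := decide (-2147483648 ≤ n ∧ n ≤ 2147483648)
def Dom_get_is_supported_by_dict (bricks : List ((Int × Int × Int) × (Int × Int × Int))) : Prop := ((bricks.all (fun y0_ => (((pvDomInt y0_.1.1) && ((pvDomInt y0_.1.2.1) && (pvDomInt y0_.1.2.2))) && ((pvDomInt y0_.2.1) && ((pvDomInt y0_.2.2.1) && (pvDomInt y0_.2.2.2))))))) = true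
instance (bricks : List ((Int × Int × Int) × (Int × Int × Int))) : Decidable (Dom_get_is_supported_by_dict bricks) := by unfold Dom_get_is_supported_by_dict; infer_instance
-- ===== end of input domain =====

-- B drops A's mutable 10×10 heightmap dict: each brick's column heights/supporters are read off a
-- grow-only list of settled (footprint, top) records by a last-covering-brick scan (objective: alternative).

-- ===== PORT A =====
-- the 10×10 grid dict  {(x, y): (0, -1) for x in range(10) for y in range(10)}
def pvGrid : PySem.Dict (Int × Int) (Int × Int) :=
  (PySem.List.pyRange 0 10 1).foldl (fun d x =>
    (PySem.List.pyRange 0 10 1).foldl (fun d y => d.insert (x, y) ((0 : Int), (-1 : Int))) d)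
    PySem.Dict.empty

-- one iteration of A's main loop; n is the enumerate index.  basis[(x, y)] is ported as
-- getD … (0, -1): Pre_ guarantees every accessed key is present, so the default is never read.
def pvStepA (n : Nat) (basis : PySem.Dict (Int × Int) (Int × Int))
    (isby : List (List Int)) (b : (Int × Int × Int) × (Int × Int × Int)) :
    PySem.Dict (Int × Int) (Int × Int) × List (List Int) :=
  match b with
  | ((x_s, y_s, z_s), (x_e, y_e, z_e)) =>
    if x_s ≠ x_e then
      -- z_max = max([...]); max([]) raises ValueError in Python: the none case is excluded by Pre_
      let zs : List Int :=
        (PySem.List.pyRange x_s (x_e + 1) 1).map (fun x => (basis.getD (x, y_e) (0, -1)).1)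
      let zmax : Int :=
        match PySem.List.max? zs (fun z => z) with
        | some m => m
        | none => 0
      (PySem.List.pyRange x_s (x_e + 1) 1).foldl
        (fun (st : PySem.Dict (Int × Int) (Int × Int) × List (List Int)) x =>
        let p : Int × Int := st.1.getD (x, y_e) (0, -1)
        let row : List Int := st.2.getD n []
        (st.1.insert (x, y_e) (zmax + 1, (n : Int)),
         if p.1 = zmax ∧ p.2 ∉ row then st.2.set n (row ++ [p.2]) else st.2)) (basis, isby)
    else if y_s ≠ y_e then
      let zs : List Int :=
        (PySem.List.pyRange y_s (y_e + 1) 1).map (fun y => (basis.getD (x_e, y) (0, -1)).1)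
      let zmax : Int :=
        match PySem.List.max? zs (fun z => z) with
        | some m => m
        | none => 0
      (PySem.List.pyRange y_s (y_e + 1) 1).foldl
        (fun (st : PySem.Dict (Int × Int) (Int × Int) × List (List Int)) y =>
        let p : Int × Int := st.1.getD (x_e, y) (0, -1)
        let row : List Int := st.2.getD n []
        (st.1.insert (x_e, y) (zmax + 1, (n : Int)),
         if p.1 = zmax ∧ p.2 ∉ row then st.2.set n (row ++ [p.2]) else st.2)) (basis, isby)
    else
      let b0 := (basis.getD (x_e, y_e) (0, -1)).2
      let isby2 := isby.set n (isby.getD n [] ++ [b0])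
      let curr := (basis.getD (x_s, y_s) (0, -1)).1
      (basis.insert (x_s, y_s) (curr + z_e - z_s + 1, (n : Int)), isby2)

def pvLoopA : List ((Int × Int × Int) × (Int × Int × Int)) → Nat →
    PySem.Dict (Int × Int) (Int × Int) → List (List Int) → List (List Int)
  | [], _, _, isby => isby
  | b :: rest, n, basis, isby =>
    let st := pvStepA n basis isby b
    pvLoopA rest (n + 1) st.1 st.2

def get_is_supported_by_dict (bricks : List ((Int × Int × Int) × (Int × Int × Int))) : List (List Int) :=
  let bricks' := PySem.List.sorted bricks (fun brick => brick.1.2.2) false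
  pvLoopA bricks' 0 pvGrid (List.replicate bricks'.length [])

-- ===== PORT B =====
-- footprint cells and height of one brick
def pvCellsHeight (b : (Int × Int × Int) × (Int × Int × Int)) : List (Int × Int) × Int :=
  match b with
  | ((x_s, y_s, z_s), (x_e, y_e, z_e)) =>
    if x_s ≠ x_e then ((PySem.List.pyRange x_s (x_e + 1) 1).map (fun x => (x, y_e)), 1)
    else if y_s ≠ y_e then ((PySem.List.pyRange y_s (y_e + 1) 1).map (fun y => (x_e, y)), 1)
    else ([(x_s, y_s)], z_e - z_s + 1)

-- B's inner scan:  for j, (fp, t) in enumerate(settled): if c in fp: top, owner = t, j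
def pvColLoop : List (List (Int × Int) × Int) → Nat → (Int × Int) → (Int × Int) → Int × Int
  | [], _, _, acc => acc
  | (fp, t) :: rest, j, c, acc =>
    pvColLoop rest (j + 1) c (if c ∈ fp then (t, (j : Int)) else acc)

def pvCol (settled : List (List (Int × Int) × Int)) (c : Int × Int) : Int × Int :=
  pvColLoop settled 0 c (0, -1)

-- one iteration of B's loop: (supporters of this brick, its settled record)
def pvStepB (settled : List (List (Int × Int) × Int))
    (b : (Int × Int × Int) × (Int × Int × Int)) : List Int × (List (Int × Int) × Int) :=
  let ch := pvCellsHeight b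
  let columns := ch.1.map (fun c => pvCol settled c)
  -- z_max = max(top for top, _ in columns); the empty case (a Python ValueError) is excluded by Pre_
  let zmax : Int :=
    match PySem.List.max? (columns.map (fun (p : Int × Int) => p.1)) (fun z => z) with
    | some m => m
    | none => 0
  let supp := columns.foldl (fun (s : List Int) (p : Int × Int) => if p.1 = zmax ∧ p.2 ∉ s then s ++ [p.2] else s) []
  (supp, (ch.1, zmax + ch.2))

def pvLoopB : List ((Int × Int × Int) × (Int × Int × Int)) →
    List (List (Int × Int) × Int) → List (List Int) → List (List Int)
  | [], _, acc => acc
  | b :: rest, settled, acc =>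
    let st := pvStepB settled b
    pvLoopB rest (settled ++ [st.2]) (acc ++ [st.1])

def get_is_supported_by_dict_alt (bricks : List ((Int × Int × Int) × (Int × Int × Int))) : List (List Int) :=
  let order := PySem.List.sorted bricks (fun brick => brick.1.2.2) false
  pvLoopB order [] []

-- ===== PRECONDITION & SPEC =====
def pvPreBrick (b : (Int × Int × Int) × (Int × Int × Int)) : Bool :=
  match b with
  | ((x_s, y_s, _), (x_e, y_e, _)) =>
    if x_s ≠ x_e then decide (x_s < x_e ∧ 0 ≤ x_s ∧ x_e ≤ 9 ∧ 0 ≤ y_e ∧ y_e ≤ 9)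
    else if y_s ≠ y_e then decide (y_s < y_e ∧ 0 ≤ y_s ∧ y_e ≤ 9 ∧ 0 ≤ x_e ∧ x_e ≤ 9)
    else decide (0 ≤ x_e ∧ x_e ≤ 9 ∧ 0 ≤ y_e ∧ y_e ≤ 9)

-- Pre_ is exactly the set of inputs where Python A returns: every brick's footprint must lie inside
-- the 10×10 grid (else KeyError) with nondecreasing x/y extent (else max of an empty range raises ValueError).
def Pre_get_is_supported_by_dict (bricks : List ((Int × Int × Int) × (Int × Int × Int))) : Prop :=
  bricks.all pvPreBrick = true
instance (bricks : List ((Int × Int × Int) × (Int × Int × Int))) : Decidable (Pre_get_is_supported_by_dict bricks) := by unfold Pre_get_is_supported_by_dict; infer_instance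

def pvWitness_get_is_supported_by_dict : (List ((Int × Int × Int) × (Int × Int × Int))) :=
  [((1, 2, 3), (1, 2, 5)), ((0, 2, 4), (3, 2, 4)), ((2, 0, 6), (2, 4, 6))]

def Spec_get_is_supported_by_dict (bricks : List ((Int × Int × Int) × (Int × Int × Int))) (out : List (List Int)) : Prop := out = get_is_supported_by_dict_alt bricks
instance (bricks : List ((Int × Int × Int) × (Int × Int × Int))) (out : List (List Int)) : Decidable (Spec_get_is_supported_by_dict bricks out) := by unfold Spec_get_is_supported_by_dict; infer_instance

-- ===== CLAIM (what is proved, stated in full; the proofs are below) =====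
def Claim_equal_get_is_supported_by_dict : Prop := ∀ (bricks : List ((Int × Int × Int) × (Int × Int × Int))), Dom_get_is_supported_by_dict bricks → Pre_get_is_supported_by_dict bricks → Spec_get_is_supported_by_dict bricks (get_is_supported_by_dict bricks)

-- ===== LEMMAS AND PROOFS =====

-- appending one settled record to B's column scan: the new record wins exactly on its footprint
lemma pv_colLoop_append (s : List (List (Int × Int) × Int)) (e : List (Int × Int) × Int)
    (j : Nat) (c : Int × Int) (acc : Int × Int) :
    pvColLoop (s ++ [e]) j c acc =
      if c ∈ e.1 then (e.2, ((j + s.length : Nat) : Int)) else pvColLoop s j c acc := by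
  obtain ⟨fp, t⟩ := e
  induction s generalizing j acc with
  | nil => simp [pvColLoop]
  | cons hd tl ih =>
    obtain ⟨fp, t⟩ := hd
    simp only [List.cons_append, pvColLoop, ih, List.length_cons]
    congr 2
    omega

lemma pv_col_append (s : List (List (Int × Int) × Int)) (e : List (Int × Int) × Int)
    (c : Int × Int) :
    pvCol (s ++ [e]) c = if c ∈ e.1 then (e.2, (s.length : Int)) else pvCol s c := by
  unfold pvCol
  rw [pv_colLoop_append]
  simp

-- every cell of the initial grid dict reads (0, -1), which is also the getD default
lemma pv_inner_grid (ys : List Int) (x : Int) (d : PySem.Dict (Int × Int) (Int × Int))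
    (h : ∀ k, d.getD k ((0 : Int), (-1 : Int)) = (0, -1)) :
    ∀ k, (ys.foldl (fun d y => d.insert (x, y) ((0 : Int), (-1 : Int))) d).getD k (0, -1) = (0, -1) := by
  induction ys generalizing d with
  | nil => exact h
  | cons y ys ih =>
    intro k
    refine ih _ (fun k => ?_) k
    rw [PySem.Dict.getD_insert]
    split
    · rfl
    · exact h k

lemma pv_outer_grid (xs ys : List Int) (d : PySem.Dict (Int × Int) (Int × Int))
    (h : ∀ k, d.getD k ((0 : Int), (-1 : Int)) = (0, -1)) :
    ∀ k, (xs.foldl (fun d x => ys.foldl (fun d y => d.insert (x, y) ((0 : Int), (-1 : Int))) d) d).getD k (0, -1) = (0, -1) := by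
  induction xs generalizing d with
  | nil => exact h
  | cons x xs ih => exact fun k => ih _ (pv_inner_grid ys x d h) k

lemma pv_grid_getD (c : Int × Int) : pvGrid.getD c (0, -1) = (0, -1) :=
  pv_outer_grid _ _ PySem.Dict.empty (fun _ => rfl) c

-- getD after a fold inserting the same value at every key of a list
lemma pv_getD_insert_fold (cells : List (Int × Int)) (d : PySem.Dict (Int × Int) (Int × Int))
    (v : Int × Int) (k : Int × Int) :
    (cells.foldl (fun d c => d.insert c v) d).getD k (0, -1) =
      if k ∈ cells then v else d.getD k (0, -1) := by
  induction cells generalizing d with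
  | nil => simp
  | cons c cs ih =>
    simp only [List.foldl_cons, ih, PySem.Dict.getD_insert, List.mem_cons]
    by_cases h1 : k ∈ cs <;> by_cases h2 : k = c <;> simp [h1, h2]

-- interleaved read/insert loop over distinct cells = inserts, with all reads from the initial dict
lemma pv_interleave (cells : List (Int × Int)) (hnd : cells.Nodup)
    (d : PySem.Dict (Int × Int) (Int × Int)) (isby : List (List Int)) (n : Nat)
    (zmax : Int) (v : Int × Int) :
    cells.foldl (fun (st : PySem.Dict (Int × Int) (Int × Int) × List (List Int)) c =>
        let p := st.1.getD c (0, -1)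
        let row := st.2.getD n []
        (st.1.insert c v,
         if p.1 = zmax ∧ p.2 ∉ row then st.2.set n (row ++ [p.2]) else st.2)) (d, isby) =
      (cells.foldl (fun d c => d.insert c v) d,
       cells.foldl (fun s c =>
         let p := d.getD c (0, -1)
         let row := s.getD n []
         if p.1 = zmax ∧ p.2 ∉ row then s.set n (row ++ [p.2]) else s) isby) := by
  induction cells generalizing d isby with
  | nil => rfl
  | cons c cs ih =>
    rw [List.nodup_cons] at hnd
    obtain ⟨hc, hnd'⟩ := hnd
    simp only [List.foldl_cons]
    rw [ih hnd']
    have h2 : ∀ (s0 : List (List Int)),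
        cs.foldl (fun s c' =>
          let p := (d.insert c v).getD c' (0, -1)
          let row := s.getD n []
          if p.1 = zmax ∧ p.2 ∉ row then s.set n (row ++ [p.2]) else s) s0 =
        cs.foldl (fun s c' =>
          let p := d.getD c' (0, -1)
          let row := s.getD n []
          if p.1 = zmax ∧ p.2 ∉ row then s.set n (row ++ [p.2]) else s) s0 := by
      intro s0
      refine PySem.List.foldl_congr_mem cs _ _ s0 (fun acc x hx => ?_)
      rw [PySem.Dict.getD_insert_of_ne d v (0, -1) (fun (h : x = c) => hc (h ▸ hx))]
    rw [h2]

-- a loop appending into slot n of isby = one set of slot n to the row-level loop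
lemma pv_set_fold (cells : List (Int × Int)) (g : (Int × Int) → Int × Int)
    (zmax : Int) (n : Nat) (isby : List (List Int)) (hn : n < isby.length) :
    cells.foldl (fun s c =>
        let p := g c
        let row := s.getD n []
        if p.1 = zmax ∧ p.2 ∉ row then s.set n (row ++ [p.2]) else s) isby =
      isby.set n (cells.foldl (fun r c =>
        let p := g c
        if p.1 = zmax ∧ p.2 ∉ r then r ++ [p.2] else r) (isby.getD n [])) := by
  induction cells generalizing isby with
  | nil =>
    simp only [List.foldl_nil]
    rw [List.getD_eq_getElem isby [] hn, List.set_getElem_self]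
  | cons c cs ih =>
    simp only [List.foldl_cons]
    by_cases hcond : (g c).1 = zmax ∧ (g c).2 ∉ isby.getD n []
    · rw [if_pos hcond, if_pos hcond,
        ih (isby.set n (isby.getD n [] ++ [(g c).2])) (by simpa using hn)]
      rw [List.set_set]
      congr 1
      congr 1
      rw [List.getD_eq_getElem _ [] (by simpa using hn)]
      simp [hn]
    · rw [if_neg hcond, if_neg hcond, ih isby hn]

-- one horizontal branch of A over keys f x = B's supporter fold over the cell list l.map f,
-- plus the per-cell effect of A's inserts, all reads routed through g = B's column reader
lemma pv_branch (l : List Int) (f : Int → Int × Int) (hinj : Function.Injective f)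
    (hl : l.Nodup) (dA : PySem.Dict (Int × Int) (Int × Int)) (g : (Int × Int) → Int × Int)
    (hd : ∀ c, dA.getD c (0, -1) = g c)
    (isby : List (List Int)) (n : Nat) (hn : n < isby.length) (h0 : isby.getD n [] = [])
    (zmax v : Int) :
    (l.foldl (fun (st : PySem.Dict (Int × Int) (Int × Int) × List (List Int)) x =>
        let p := st.1.getD (f x) (0, -1)
        let row := st.2.getD n []
        (st.1.insert (f x) (v, (n : Int)),
         if p.1 = zmax ∧ p.2 ∉ row then st.2.set n (row ++ [p.2]) else st.2)) (dA, isby)).2 =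
      isby.set n ((l.map f).foldl (fun s c =>
        let p := g c
        if p.1 = zmax ∧ p.2 ∉ s then s ++ [p.2] else s) []) ∧
    ∀ c, (l.foldl (fun (st : PySem.Dict (Int × Int) (Int × Int) × List (List Int)) x =>
        let p := st.1.getD (f x) (0, -1)
        let row := st.2.getD n []
        (st.1.insert (f x) (v, (n : Int)),
         if p.1 = zmax ∧ p.2 ∉ row then st.2.set n (row ++ [p.2]) else st.2)) (dA, isby)).1.getD
        c (0, -1) =
      if c ∈ l.map f then (v, (n : Int)) else g c := by
  have hnd : (l.map f).Nodup := hl.map hinj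
  have hfold : (l.foldl (fun (st : PySem.Dict (Int × Int) (Int × Int) × List (List Int)) x =>
        let p := st.1.getD (f x) (0, -1)
        let row := st.2.getD n []
        (st.1.insert (f x) (v, (n : Int)),
         if p.1 = zmax ∧ p.2 ∉ row then st.2.set n (row ++ [p.2]) else st.2)) (dA, isby)) =
      ((l.map f).foldl (fun (st : PySem.Dict (Int × Int) (Int × Int) × List (List Int)) c =>
        let p := st.1.getD c (0, -1)
        let row := st.2.getD n []
        (st.1.insert c (v, (n : Int)),
         if p.1 = zmax ∧ p.2 ∉ row then st.2.set n (row ++ [p.2]) else st.2)) (dA, isby)) := by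
    rw [List.foldl_map]
  rw [hfold, pv_interleave (l.map f) hnd dA isby n zmax (v, (n : Int))]
  constructor
  · dsimp only
    have hread : (l.map f).foldl (fun s c =>
          let p := dA.getD c (0, -1)
          let row := s.getD n []
          if p.1 = zmax ∧ p.2 ∉ row then s.set n (row ++ [p.2]) else s) isby =
        (l.map f).foldl (fun s c =>
          let p := g c
          let row := s.getD n []
          if p.1 = zmax ∧ p.2 ∉ row then s.set n (row ++ [p.2]) else s) isby := by
      refine PySem.List.foldl_congr_mem (l.map f) _ _ isby (fun acc x _ => ?_)
      rw [hd]
    rw [hread, pv_set_fold (l.map f) g zmax n isby hn, h0]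
  · intro c
    rw [pv_getD_insert_fold (l.map f) dA (v, (n : Int)) c]
    split
    · rfl
    · exact hd c

lemma pv_max_singleton (a : Int) :
    (match PySem.List.max? [a] (fun z => z) with | some m => m | none => 0) = a := rfl

-- one step of A = (write B's supporter list into slot n, B's new settled record), given that
-- A's dict reads agree with B's column scan
lemma pv_step_eq (settled : List (List (Int × Int) × Int))
    (dA : PySem.Dict (Int × Int) (Int × Int)) (isby : List (List Int))
    (b : (Int × Int × Int) × (Int × Int × Int))
    (hn : settled.length < isby.length) (h0 : isby.getD settled.length [] = [])
    (hd : ∀ c, dA.getD c (0, -1) = pvCol settled c) :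
    (pvStepA settled.length dA isby b).2 = isby.set settled.length (pvStepB settled b).1 ∧
      ∀ c, (pvStepA settled.length dA isby b).1.getD c (0, -1) =
        pvCol (settled ++ [(pvStepB settled b).2]) c := by
  obtain ⟨⟨x_s, y_s, z_s⟩, x_e, y_e, z_e⟩ := b
  simp only [pvStepA, pvStepB, pvCellsHeight]
  by_cases hx : x_s ≠ x_e
  · simp only [if_pos hx]
    have hz : ((PySem.List.pyRange x_s (x_e + 1) 1).map (fun x => (dA.getD (x, y_e) (0, -1)).1)) =
        ((((PySem.List.pyRange x_s (x_e + 1) 1).map (fun x => (x, y_e))).map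
          (fun c => pvCol settled c)).map (fun p => p.1)) := by
      rw [List.map_map, List.map_map]
      exact List.map_congr_left (fun x _ => by simp [hd])
    rw [hz]
    obtain ⟨hA, hB⟩ := pv_branch (PySem.List.pyRange x_s (x_e + 1) 1) (fun x => (x, y_e))
      (fun a b h => by simpa using congrArg Prod.fst h)
      (PySem.List.nodup_pyRange_one x_s (x_e + 1)) dA (pvCol settled) hd isby settled.length hn h0
      (match PySem.List.max?
        ((((PySem.List.pyRange x_s (x_e + 1) 1).map (fun x => (x, y_e))).map
          (fun c => pvCol settled c)).map (fun p => p.1)) (fun z => z) with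
       | some m => m | none => 0) _
    refine ⟨?_, ?_⟩
    · rw [hA]
      congr 1
      simp only [List.foldl_map]
    · intro c
      rw [hB c, pv_col_append]
  · simp only [if_neg hx]
    by_cases hy : y_s ≠ y_e
    · simp only [if_pos hy]
      have hz : ((PySem.List.pyRange y_s (y_e + 1) 1).map (fun y => (dA.getD (x_e, y) (0, -1)).1)) =
          ((((PySem.List.pyRange y_s (y_e + 1) 1).map (fun y => (x_e, y))).map
            (fun c => pvCol settled c)).map (fun p => p.1)) := by
        rw [List.map_map, List.map_map]
        exact List.map_congr_left (fun y _ => by simp [hd])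
      rw [hz]
      obtain ⟨hA, hB⟩ := pv_branch (PySem.List.pyRange y_s (y_e + 1) 1) (fun y => (x_e, y))
        (fun a b h => by simpa using congrArg Prod.snd h)
        (PySem.List.nodup_pyRange_one y_s (y_e + 1)) dA (pvCol settled) hd isby settled.length hn h0
        (match PySem.List.max?
          ((((PySem.List.pyRange y_s (y_e + 1) 1).map (fun y => (x_e, y))).map
            (fun c => pvCol settled c)).map (fun p => p.1)) (fun z => z) with
         | some m => m | none => 0) _
      refine ⟨?_, ?_⟩
      · rw [hA]
        congr 1
        simp only [List.foldl_map]
      · intro c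
        rw [hB c, pv_col_append]
    · simp only [if_neg hy]
      rw [not_not] at hx hy
      subst hx hy
      refine ⟨?_, ?_⟩
      · simp only [List.getD] at h0
        simp [pv_max_singleton, hd, h0]
      · intro c
        rw [PySem.Dict.getD_insert, pv_col_append]
        simp only [List.map_cons, List.map_nil, pv_max_singleton, List.mem_cons,
          List.not_mem_nil, or_false]
        split
        · congr 1
          rw [hd]
          ring
        · exact hd c

lemma pv_loop_eq (rest : List ((Int × Int × Int) × (Int × Int × Int)))
    (acc : List (List Int)) (settled : List (List (Int × Int) × Int))
    (dA : PySem.Dict (Int × Int) (Int × Int))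
    (hlen : settled.length = acc.length)
    (hd : ∀ c, dA.getD c (0, -1) = pvCol settled c) :
    pvLoopA rest acc.length dA (acc ++ List.replicate rest.length []) =
      pvLoopB rest settled acc := by
  induction rest generalizing acc settled dA with
  | nil => simp [pvLoopA, pvLoopB]
  | cons b rest ih =>
    have hn : settled.length < (acc ++ List.replicate (b :: rest).length ([] : List Int)).length := by
      simp [hlen]
    have h0 : (acc ++ List.replicate (b :: rest).length ([] : List Int)).getD settled.length [] = [] := by
      simp [List.getD, hlen]
    obtain ⟨h2, h1⟩ := pv_step_eq settled dA _ b hn h0 hd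
    simp only [pvLoopA, pvLoopB]
    rw [← hlen, h2]
    have hset : (acc ++ List.replicate (b :: rest).length ([] : List Int)).set settled.length
        (pvStepB settled b).1 =
        (acc ++ [(pvStepB settled b).1]) ++ List.replicate rest.length [] := by
      rw [hlen, List.length_cons, List.replicate_succ, List.set_append_right _ _ (le_refl _)]
      simp
    rw [hset]
    have hlen2 : settled.length + 1 = (acc ++ [(pvStepB settled b).1]).length := by
      simp [hlen]
    rw [hlen2]
    exact ih (acc ++ [(pvStepB settled b).1]) (settled ++ [(pvStepB settled b).2]) _
      (by simp [hlen]) h1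

-- ===== VERDICT (by name: the statement is the Claim_ definition above) =====
theorem get_is_supported_by_dict_spec : Claim_equal_get_is_supported_by_dict := by
  intro bricks _ _
  unfold Spec_get_is_supported_by_dict get_is_supported_by_dict get_is_supported_by_dict_alt
  simpa using pv_loop_eq (PySem.List.sorted bricks (fun brick => brick.1.2.2) false) [] [] pvGrid
    rfl (fun c => pv_grid_getD c)
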